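-- pv_equiv track=rewrite | github.com/NickSager/advent-of-code | 2023/7.py | sort_hands
-- ===== SOURCE A (Python) =====
-- from collections import Counter
--
-- def score(hand, part2=False):
--     if part2 and hand != 'JJJJJ':
--         hand = hand.replace('J', Counter(c for c in hand if c != 'J').most_common(1)[0][0])
--     hand = Counter(hand).most_common()
--
--
--     if hand[0][1] == 5:
--         return 1
--     elif hand[0][1] == 4:
--         return 2
--     elif hand[0][1]==3:
--         if hand[1][1]==2:
--             return 3  # Full House
--         else:
--             return 4  # Three of a kind
--     elif hand[0][1] == 2:
--         if hand[1][1] == 2: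
--             return 5  # Two pair
--         else:
--             return 6 # One pair
--     else:
--         return 7  # High Card
--
-- def sort_hands(hands, rank, part2=False):
--     sorted_hands = sorted(
--         hands,
--         key = lambda h: (  # Help from GPT-4 on this ranking section
--             score(h[0], part2),
--             tuple(rank.index(card) for card in h[0])
--         ), reverse = True
--     )
--     return sorted_hands
-- ===== SOURCE B (Python) =====
-- def _score(hand, part2):
--     # jokers are never re-lettered: count them, rank the remaining cards by a
--     # run-length scan over their sorted order, and let the joker count join
--     # the biggest group arithmetically
--     nJ = hand.count('J') if part2 else 0
--     cards = sorted(c for c in hand if not (part2 and c == 'J'))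
--     best = second = 0
--     i, n = 0, len(cards)
--     while i < n:                      # run-length scan over the sorted cards
--         j = i + 1
--         while j < n and cards[j] == cards[i]:
--             j += 1
--         run = j - i
--         if run > best:
--             best, second = run, best
--         elif run > second:
--             second = run
--         i = j
--     best += nJ
--     if best == 5:
--         return 1
--     if best == 4:
--         return 2
--     if best in (2, 3):
--         return 10 - 2 * best - (second == 2)
--     return 7
--
--
-- def sort_hands(hands, rank, part2=False):
--     # bucket (radix) pass on the score, then one stable sort per bucket
--     buckets = {}
--     for h in hands:
--         s = _score(h[0], part2)
--         buckets[s] = buckets.get(s, []) + [h]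
--     out = []
--     for s in range(7, 0, -1):
--         out += sorted(buckets.get(s, []),
--                       key=lambda h: tuple(rank.index(c) for c in h[0]),
--                       reverse=True)
--     return out
-- ===== Notes on version B (the rewrite author's own statement) =====
-- stated objective: alternative
-- what changed: score no longer rewrites the hand string and cascades over Counter.most_common(): B counts jokers, run-length-scans the sorted remaining cards keeping only the two largest run lengths, adds the joker count arithmetically to the largest run, and maps (best, second) to the score by a small formula; sort_hands no longer does one compound-key sort but a bucket (radix) pass on the score followed by one stable card-order sort per bucket.
import Mathlib
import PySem

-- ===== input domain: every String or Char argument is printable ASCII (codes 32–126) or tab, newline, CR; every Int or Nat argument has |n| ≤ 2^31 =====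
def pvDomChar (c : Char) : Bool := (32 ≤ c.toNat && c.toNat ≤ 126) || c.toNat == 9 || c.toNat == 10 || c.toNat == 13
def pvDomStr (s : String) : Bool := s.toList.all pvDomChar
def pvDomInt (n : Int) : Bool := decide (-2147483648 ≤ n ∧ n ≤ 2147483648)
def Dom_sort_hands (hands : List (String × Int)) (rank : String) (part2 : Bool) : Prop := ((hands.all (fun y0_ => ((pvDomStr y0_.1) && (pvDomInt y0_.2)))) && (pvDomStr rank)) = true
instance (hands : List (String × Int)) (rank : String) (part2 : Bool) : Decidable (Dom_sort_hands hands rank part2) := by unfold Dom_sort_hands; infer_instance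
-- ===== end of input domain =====

-- B re-ranks hands without rewriting the hand string: jokers are counted and merged
-- arithmetically into the largest run found by a run-length scan of the sorted remaining
-- cards, and the final ordering is produced by a bucket pass on the score plus one stable
-- per-bucket sort, instead of A's Counter/most_common cascade inside one compound-key sort
-- (objective: alternative — same asymptotic cost, different algorithm).

-- ===== PORT A =====
-- score(hand, part2): the part2 J-substitution, then the cascade over Counter(hand).most_common()
def pyEffHand (hand : List Char) (part2 : Bool) : List Char :=
  if part2 = true ∧ hand ≠ ['J', 'J', 'J', 'J', 'J'] then
    -- Counter(c for c in hand if c != 'J').most_common(1)[0][0]; [0] raises on an all-J hand (outside Pre_), default '?'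
    let mc : Char := ((PySem.List.max? (PySem.Dict.counter (hand.filter (fun c => c ≠ 'J'))).items (fun p => p.2)).getD ('?', 0)).1
    PySem.Chars.replace hand ['J'] [mc]
  else hand

def pyScoreA (hand : List Char) (part2 : Bool) : Int :=
  let hand1 := pyEffHand hand part2
  let mcl := PySem.List.sorted (PySem.Dict.counter hand1).items (fun p => p.2) true  -- Counter(hand).most_common()
  let c0 : Int := (PySem.List.pyGetD mcl 0 ('?', 0)).2   -- hand[0][1]; IndexError on '' is outside Pre_
  if c0 = 5 then 1
  else if c0 = 4 then 2
  else if c0 = 3 then (if (PySem.List.pyGetD mcl 1 ('?', 0)).2 = 2 then 3 else 4)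
  else if c0 = 2 then (if (PySem.List.pyGetD mcl 1 ('?', 0)).2 = 2 then 5 else 6)
  else 7

def sort_hands (hands : List (String × Int)) (rank : String) (part2 : Bool) : List (String × Int) :=
  PySem.List.sorted2 hands
    (fun h => pyScoreA h.1.toList part2)
    (fun h => h.1.toList.map (fun c => (PySem.List.index? rank.toList c).getD 0))  -- rank.index(card); ValueError outside Pre_
    true

-- ===== PORT B =====
-- the inner while-loop pair of Source B's _score: scan the runs of the (sorted) card list,
-- keeping the two largest run lengths
def runScanB : List Char → Int → Int → Int × Int
  | [], best, second => (best, second)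
  | c :: rest, best, second =>
    let run : Int := 1 + (rest.takeWhile (fun d => d == c)).length
    if best < run then runScanB (rest.dropWhile (fun d => d == c)) run best
    else if second < run then runScanB (rest.dropWhile (fun d => d == c)) best run
    else runScanB (rest.dropWhile (fun d => d == c)) best second
termination_by l => l.length
decreasing_by all_goals (simp only [List.length_cons]; have := List.length_dropWhile_le (fun d => d == c) rest; omega)

-- the closing if-chain of Source B's _score
def pyFormulaB (best second : Int) : Int :=
  if best = 5 then 1
  else if best = 4 then 2
  else if best = 2 ∨ best = 3 then 10 - 2 * best - (if second = 2 then 1 else 0)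
  else 7

def pyScoreB (hand : List Char) (part2 : Bool) : Int :=
  let nJ : Int := if part2 then (PySem.Chars.count hand ['J'] : Int) else 0
  let cards := PySem.List.sorted (hand.filter (fun c => !(part2 && c == 'J'))) (fun c => c) false
  let bs := runScanB cards 0 0
  pyFormulaB (bs.1 + nJ) bs.2

def sort_hands_alt (hands : List (String × Int)) (rank : String) (part2 : Bool) : List (String × Int) :=
  let buckets : PySem.Dict Int (List (String × Int)) :=
    hands.foldl (fun d h => d.modify (pyScoreB h.1.toList part2) [] (fun l => l ++ [h])) PySem.Dict.empty
  (PySem.List.pyRange 7 0 (-1)).foldl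
    (fun out s => out ++ PySem.List.sorted (buckets.getD s [])
      (fun h => h.1.toList.map (fun c => (PySem.List.index? rank.toList c).getD 0)) true) []

-- ===== PRECONDITION & SPEC =====
-- shape of a hand on which A's score returns (no IndexError): not an all-J part2 hand of length ≠ 5,
-- and length 1, ≥ 4, or length 2-3 with at least two distinct cards after the J-substitution
def pyScoreOk (hand : List Char) (part2 : Bool) : Bool :=
  !(part2 && hand.all (fun c => c == 'J') && hand.length != 5)
  && (hand.length == 1 || decide (4 ≤ hand.length)
      || (decide (2 ≤ hand.length) && decide (hand.length ≤ 3)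
          && (if part2 && hand.contains 'J' then 2 ≤ (hand.filter (fun c => c ≠ 'J')).dedup.length
              else 2 ≤ hand.dedup.length)))

-- Pre_: exactly the inputs on which the Python A returns — every card of every hand occurs in rank (else
-- rank.index raises ValueError) and every hand has a shape on which score returns.
def Pre_sort_hands (hands : List (String × Int)) (rank : String) (part2 : Bool) : Prop :=
  (hands.all (fun p => p.1.toList.all (fun c => rank.toList.contains c) && pyScoreOk p.1.toList part2)) = true
instance (hands : List (String × Int)) (rank : String) (part2 : Bool) : Decidable (Pre_sort_hands hands rank part2) := by unfold Pre_sort_hands; infer_instance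

def pvWitness_sort_hands : (List (String × Int)) × String × Bool := ([("AAAKJ", 3)], "AKJ", true)

def Spec_sort_hands (hands : List (String × Int)) (rank : String) (part2 : Bool) (out : List (String × Int)) : Prop := out = sort_hands_alt hands rank part2
instance (hands : List (String × Int)) (rank : String) (part2 : Bool) (out : List (String × Int)) : Decidable (Spec_sort_hands hands rank part2 out) := by unfold Spec_sort_hands; infer_instance

-- ===== CLAIM (what is proved, stated in full; the proofs are below) =====
def Claim_equal_sort_hands : Prop := ∀ (hands : List (String × Int)) (rank : String) (part2 : Bool), Dom_sort_hands hands rank part2 → Pre_sort_hands hands rank part2 → Spec_sort_hands hands rank part2 (sort_hands hands rank part2)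

-- ===== LEMMAS AND PROOFS =====

theorem insertBy_congr {α : Type} (f g : α → α → Bool) (x : α) (ys : List α)
    (h : ∀ y ∈ ys, f x y = g x y) :
    PySem.List.insertBy f x ys = PySem.List.insertBy g x ys := by
  induction ys with
  | nil => rfl
  | cons y ys ih =>
    have hxy : f x y = g x y := h y (by simp)
    simp only [PySem.List.insertBy]
    rw [hxy, ih (fun z hz => h z (by simp [hz]))]

theorem insertBy_append_left {α : Type} (bef : α → α → Bool) (x : α) (A B : List α)
    (h : ∀ a ∈ A, bef x a = false) :
    PySem.List.insertBy bef x (A ++ B) = A ++ PySem.List.insertBy bef x B := by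
  induction A with
  | nil => rfl
  | cons a A ih =>
    simp only [List.cons_append, PySem.List.insertBy, h a (by simp)]
    simp only [Bool.false_eq_true, if_false, List.cons.injEq, true_and]
    exact ih (fun a ha => h a (by simp [ha]))

theorem insertBy_append_right {α : Type} (bef : α → α → Bool) (x : α) (B C : List α)
    (h : ∀ c ∈ C, bef x c = true) :
    PySem.List.insertBy bef x (B ++ C) = PySem.List.insertBy bef x B ++ C := by
  induction B with
  | nil =>
    cases C with
    | nil => rfl
    | cons c C => simp [PySem.List.insertBy, h c (by simp)]
  | cons b B ih =>
    simp only [List.cons_append, PySem.List.insertBy]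
    by_cases hb : bef x b
    · simp [hb]
    · simp only [hb]; simp [ih]

-- sorted values = snd-image of sorted items (stability, both reverse=True)
theorem map_insertBy {α β : Type} (f : α → β) (bef : α → α → Bool) (bef' : β → β → Bool)
    (hc : ∀ a b, bef a b = bef' (f a) (f b)) (x : α) :
    ∀ ys, (PySem.List.insertBy bef x ys).map f = PySem.List.insertBy bef' (f x) (ys.map f) := by
  intro ys
  induction ys with
  | nil => rfl
  | cons y ys ih =>
    simp only [PySem.List.insertBy, List.map_cons]
    rw [← hc x y]
    by_cases hb : bef x y
    · simp [hb]
    · simp [hb, ih]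

theorem map_foldl_insertBy {α β : Type} (f : α → β) (bef : α → α → Bool) (bef' : β → β → Bool)
    (hc : ∀ a b, bef a b = bef' (f a) (f b)) :
    ∀ (xs acc : List α), (xs.foldl (fun acc x => PySem.List.insertBy bef x acc) acc).map f
      = (xs.map f).foldl (fun acc y => PySem.List.insertBy bef' y acc) (acc.map f) := by
  intro xs
  induction xs with
  | nil => intro acc; rfl
  | cons x xs ih =>
    intro acc
    simp only [List.foldl_cons, List.map_cons]
    rw [ih (PySem.List.insertBy bef x acc), map_insertBy f bef bef' hc x acc]

theorem sorted_values_eq {κ : Type} [BEq κ] (d : PySem.Dict κ Int) :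
    PySem.List.sorted d.values (fun v => v) true
      = (PySem.List.sorted d.items (fun p => p.2) true).map (fun p => p.2) := by
  rw [PySem.List.sorted_rev_eq_foldl_insertBy, PySem.List.sorted_rev_eq_foldl_insertBy]
  have hval : d.values = d.items.map (fun p => p.2) := rfl
  rw [hval]
  exact (map_foldl_insertBy (fun p => p.2) _ _ (fun a b => rfl) d.items []).symm

-- getD through a snd-projection
theorem getD_map_snd {κ : Type} (xs : List (κ × Int)) (n : Nat) (j : κ) :
    (xs.map (fun p => p.2)).getD n 0 = (xs.getD n (j, 0)).2 := by
  induction xs generalizing n with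
  | nil => simp
  | cons x xs ih =>
    cases n with
    | zero => simp
    | succ n => simpa using ih n

theorem values_counter (l : List Char) :
    (PySem.Dict.counter l).values = (PySem.Set.ofList l).map (fun c => (l.count c : Int)) := by
  have : (PySem.Dict.counter l).values = (PySem.Dict.counter l).items.map (fun p => p.2) := rfl
  rw [this, PySem.Dict.items_counter, List.map_map]
  rfl

theorem sorted_rev_int_eq_of_perm {vs ws : List Int} (h : vs.Perm ws) :
    PySem.List.sorted vs (fun v => v) true = PySem.List.sorted ws (fun v => v) true := by
  refine List.Perm.eq_of_pairwise (le := fun a b : Int => b ≤ a) ?_ ?_ ?_ ?_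
  · intro a b _ _ h1 h2; omega
  · exact PySem.List.sorted_pairwise_rev vs (fun v => v)
  · exact PySem.List.sorted_pairwise_rev ws (fun v => v)
  · exact ((PySem.List.sorted_perm vs _ true).trans h).trans (PySem.List.sorted_perm ws _ true).symm

theorem discard_ofList_filter (c : Char) (xs : List Char) :
    (PySem.Set.ofList xs).discard c = PySem.Set.ofList (xs.filter (fun d => !(d == c))) := by
  induction xs using List.reverseRecOn with
  | nil => rfl
  | append_singleton xs x ih =>
    rw [List.filter_append, PySem.Set.ofList_append_singleton]
    by_cases hxc : x = c
    · have hfx : List.filter (fun d => !(d == c)) [x] = [] := by simp [hxc]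
      rw [hfx, List.append_nil, ← ih]
      rw [PySem.Set.add_eq_ite]
      split_ifs with hm
      · rfl
      · simp only [PySem.Set.discard, List.filter_append]
        simp [hxc]
    · have hfx : List.filter (fun d => !(d == c)) [x] = [x] := by simp [hxc]
      rw [hfx, PySem.Set.ofList_append_singleton, ← ih]
      have hmem : x ∈ (PySem.Set.ofList xs).discard c ↔ x ∈ PySem.Set.ofList xs := by
        rw [PySem.Set.mem_discard]; exact ⟨fun h => h.1, fun h => ⟨h, hxc⟩⟩
      by_cases hm : x ∈ PySem.Set.ofList xs
      · rw [PySem.Set.add_of_mem hm, PySem.Set.add_of_mem (hmem.mpr hm)]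
      · rw [PySem.Set.add_of_not_mem hm, PySem.Set.add_of_not_mem (fun hh => hm (hmem.mp hh))]
        simp only [PySem.Set.discard, List.filter_append]
        simp [hxc]

theorem ofList_perm_of_perm {l l' : List Char} (h : l.Perm l') :
    (PySem.Set.ofList l).Perm (PySem.Set.ofList l') := by
  rw [List.perm_ext_iff_of_nodup (PySem.Set.nodup_ofList l) (PySem.Set.nodup_ofList l')]
  intro a
  rw [PySem.Set.mem_ofList, PySem.Set.mem_ofList]
  exact ⟨fun hm => h.mem_iff.mp hm, fun hm => h.mem_iff.mpr hm⟩

theorem counter_values_perm {l l' : List Char} (h : l.Perm l') :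
    ((PySem.Dict.counter l).values).Perm (PySem.Dict.counter l').values := by
  rw [values_counter, values_counter]
  rw [List.map_congr_left (l := PySem.Set.ofList l)
    (f := fun c => (l.count c : Int)) (g := fun c => (l'.count c : Int))
    (fun c _ => by show ((l.count c : Int)) = ((l'.count c : Int)); rw [h.count_eq])]
  exact (ofList_perm_of_perm h).map _

def descVals (l : List Char) : List Int :=
  PySem.List.sorted (PySem.Dict.counter l).values (fun v => v) true

theorem descVals_perm {l l' : List Char} (h : l.Perm l') : descVals l = descVals l' := by
  unfold descVals
  rw [values_counter, values_counter] at *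
  exact sorted_rev_int_eq_of_perm (by
    rw [← values_counter, ← values_counter]; exact counter_values_perm h)

-- ofList of a replicate
theorem ofList_replicate (n : Nat) (a : Char) :
    PySem.Set.ofList (List.replicate n a) = if n = 0 then [] else [a] := by
  induction n with
  | zero => rfl
  | succ k ih =>
    rw [List.replicate_succ, PySem.Set.ofList_cons, ih]
    cases k <;> simp [PySem.Set.discard]

-- updating set(core) with copies of a member changes nothing
theorem update_replicate_mem (s : PySem.Set Char) (m : Char) (hm : m ∈ s) (n : Nat) :
    s.update (List.replicate n m) = s := by
  induction n with
  | zero => rfl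
  | succ k ih => rw [List.replicate_succ, PySem.Set.update_cons, PySem.Set.add_of_mem hm, ih]

theorem descVals_append_replicate (core : List Char) (m : Char) (n : Nat)
    (hmax : n ≠ 0 → ∀ c ∈ core, core.count c ≤ core.count m) :
    descVals (core ++ List.replicate n m)
      = match descVals core with
        | [] => if n = 0 then [] else [(n : Int)]
        | v :: t => (v + n) :: t := by
  rcases Nat.eq_zero_or_pos n with hn | hn
  · subst hn
    simp only [List.replicate_zero, List.append_nil, Nat.cast_zero]
    rcases h : descVals core with _ | ⟨v, t⟩
    · simp
    · simp
  have hn0 : n ≠ 0 := by omega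
  have hcnt : ∀ c : Char, ((core ++ List.replicate n m).count c : Int)
      = (core.count c : Int) + (if m = c then (n : Int) else 0) := by
    intro c
    rw [List.count_append, List.count_replicate]
    by_cases hmc : m = c
    · simp [hmc]
    · have : (m == c) = false := by simp [hmc]
      simp [this, hmc]
  rcases hcore : core with _ | ⟨c0, core'⟩
  · subst hcore
    unfold descVals
    rw [values_counter]
    simp only [List.nil_append, ofList_replicate, if_neg hn0]
    change _ = [(n : Int)]
    simp only [List.map_cons, List.map_nil, List.count_replicate, BEq.rfl]
    show PySem.List.sorted [(n : Int)] (fun v => v) true = [(n : Int)]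
    rfl
  · rw [← hcore]
    have hne : core ≠ [] := by rw [hcore]; simp
    have hmax' := hmax hn0
    have hmmem : m ∈ core := by
      have hc0 : c0 ∈ core := by rw [hcore]; simp
      have h1 : 0 < core.count c0 := List.count_pos_iff.mpr hc0
      have h2 := hmax' c0 hc0
      exact List.count_pos_iff.mp (by omega)
    have hofm : m ∈ PySem.Set.ofList core := (PySem.Set.mem_ofList core m).mpr hmmem
    rcases hS : descVals core with _ | ⟨v, t⟩
    · exfalso
      unfold descVals at hS
      rw [PySem.List.sorted_eq_nil_iff, values_counter] at hS
      rw [List.map_eq_nil_iff] at hS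
      rw [hS] at hofm
      simp at hofm
    -- notation
    have hperm0 : (descVals core).Perm ((PySem.Set.ofList core).map (fun c => (core.count c : Int))) := by
      unfold descVals; rw [values_counter]
      exact PySem.List.sorted_perm _ _ _
    have hpw' : (v :: t).Pairwise (fun a b : Int => b ≤ a) := by
      rw [← hS]; exact PySem.List.sorted_pairwise_rev _ _
    have hfm : (core.count m : Int) = v := by
      have hvmem : v ∈ (PySem.Set.ofList core).map (fun c => (core.count c : Int)) :=
        hperm0.mem_iff.mp (by rw [hS]; simp)
      have hmmem' : ((core.count m : Int)) ∈ (v :: t) := by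
        rw [← hS]
        exact hperm0.mem_iff.mpr (List.mem_map.mpr ⟨m, hofm, rfl⟩)
      have hvle : v ≤ (core.count m : Int) := by
        rcases List.mem_map.mp hvmem with ⟨c, hc, hvc⟩
        have h3 := hmax' c ((PySem.Set.mem_ofList core c).mp hc)
        have h4 : ((core.count c : Int)) ≤ (core.count m : Int) := by exact_mod_cast h3
        omega
      have hle : (core.count m : Int) ≤ v := by
        rcases List.mem_cons.mp hmmem' with h5 | h5
        · omega
        · exact (List.pairwise_cons.mp hpw').1 _ h5
      omega
    show descVals (core ++ List.replicate n m) = ((v : Int) + n) :: t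
    -- target: sorted (values (counter (core ++ rep))) = (v + n) :: t
    have herase := List.perm_cons_erase hofm
    have hnd := PySem.Set.nodup_ofList core
    have hmapg : ((PySem.Set.ofList core).map
        (fun c => (core.count c : Int) + (if m = c then (n : Int) else 0))).Perm
        (((v : Int) + n) :: ((PySem.Set.ofList core).erase m).map (fun c => (core.count c : Int))) := by
      have h6 := herase.map (fun c => (core.count c : Int) + (if m = c then (n : Int) else 0))
      refine h6.trans ?_
      rw [List.map_cons]
      have h7 : ((PySem.Set.ofList core).erase m).map
          (fun c => (core.count c : Int) + (if m = c then (n : Int) else 0))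
          = ((PySem.Set.ofList core).erase m).map (fun c => (core.count c : Int)) := by
        refine List.map_congr_left (fun c hc => ?_)
        have : c ≠ m := (hnd.mem_erase_iff.mp hc).1
        have hmn : m ≠ c := fun hh => this hh.symm
        simp [hmn]
      rw [h7, if_pos rfl, hfm]
    have htperm : t.Perm (((PySem.Set.ofList core).erase m).map (fun c => (core.count c : Int))) := by
      have h8 : (v :: t).Perm ((core.count m : Int)
          :: ((PySem.Set.ofList core).erase m).map (fun c => (core.count c : Int))) := by
        rw [← hS]
        refine hperm0.trans ?_
        have := herase.map (fun c => (core.count c : Int))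
        simpa using this
      rw [hfm] at h8
      exact h8.cons_inv
    refine List.Perm.eq_of_pairwise (le := fun a b : Int => b ≤ a) ?_ ?_ ?_ ?_
    · intro a b _ _ h1 h2; omega
    · exact PySem.List.sorted_pairwise_rev _ _
    · rw [List.pairwise_cons]
      refine ⟨fun y hy => ?_, (List.pairwise_cons.mp hpw').2⟩
      have := (List.pairwise_cons.mp hpw').1 y hy
      have hn' : (0 : Int) ≤ n := by positivity
      omega
    · refine (PySem.List.sorted_perm _ _ _).trans ?_
      rw [values_counter, PySem.Set.ofList_append, update_replicate_mem _ _ hofm]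
      have h9 : (PySem.Set.ofList core).map (fun c => ((core ++ List.replicate n m).count c : Int))
          = (PySem.Set.ofList core).map
            (fun c => (core.count c : Int) + (if m = c then (n : Int) else 0)) :=
        List.map_congr_left (fun c _ => hcnt c)
      rw [h9]
      exact hmapg.trans (htperm.symm.cons _)

def topStep (p : Int × Int) (r : Int) : Int × Int :=
  if p.1 < r then (r, p.1) else if p.2 < r then (p.1, r) else p

def runLengths : List Char → List Int
  | [] => []
  | c :: rest => ((1 + (rest.takeWhile (fun d => d == c)).length : Int))
      :: runLengths (rest.dropWhile (fun d => d == c))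
termination_by l => l.length
decreasing_by simp only [List.length_cons]; have := List.length_dropWhile_le (fun d => d == c) rest; omega

theorem runScanB_eq_foldl : ∀ (l : List Char) (b s : Int),
    runScanB l b s = (runLengths l).foldl topStep (b, s) := by
  intro l b s
  induction l, b, s using runScanB.induct with
  | case1 b s => simp [runScanB, runLengths]
  | case2 c rest b s run h ih =>
    rw [runScanB, runLengths]
    simp only [List.foldl_cons, topStep]
    split_ifs <;> exact ih
  | case3 c rest b s run h1 h2 ih =>
    rw [runScanB, runLengths]
    simp only [List.foldl_cons, topStep]
    split_ifs <;> first | exact ih | (exact absurd ‹_› h1)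
  | case4 c rest b s run h1 h2 ih =>
    rw [runScanB, runLengths]
    simp only [List.foldl_cons, topStep]
    split_ifs <;> first | exact ih | (exact absurd ‹_› h1)

theorem runLengths_grouped : ∀ (l : List Char), l.Pairwise (· ≤ ·) →
    runLengths l = (PySem.Set.ofList l).map (fun c => (l.count c : Int)) := by
  intro l
  induction l using runLengths.induct with
  | case1 => intro _; simp [runLengths]
  | case2 c rest ih =>
    intro hpw
    set A := rest.takeWhile (fun d => d == c) with hA
    set R := rest.dropWhile (fun d => d == c) with hR
    have hrest : A ++ R = rest := List.takeWhile_append_dropWhile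
    have hAc : ∀ d ∈ A, d = c := fun d hd => by
      have := List.mem_takeWhile_imp hd; simpa using this
    have hcle : ∀ y ∈ rest, c ≤ y := (List.pairwise_cons.mp hpw).1
    have hpwrest : rest.Pairwise (· ≤ ·) := (List.pairwise_cons.mp hpw).2
    have hpwR : R.Pairwise (· ≤ ·) := hpwrest.sublist (List.dropWhile_sublist _)
    have hcR : c ∉ R := by
      rcases hRc : R with _ | ⟨d, rs⟩
      · simp
      · have hd : (d == c) = false := by
          have := List.head?_dropWhile_not (fun d => d == c) rest
          rw [← hR, hRc] at this
          simpa using this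
        have hdc : d ≠ c := by simpa using hd
        have hdmem : d ∈ rest := by
          have : d ∈ R := by rw [hRc]; simp
          exact (List.dropWhile_sublist _).mem this
        have hcd : c < d := lt_of_le_of_ne (hcle d hdmem) (fun hh => hdc hh.symm)
        intro hmem
        rcases List.mem_cons.mp hmem with h1 | h1
        · exact hdc h1.symm
        · have hle : d ≤ c := (List.pairwise_cons.mp (hRc ▸ hpwR)).1 c h1
          exact absurd hle (not_le.mpr hcd)
    -- counts
    have hcntA : A.count c = A.length := List.count_eq_length.mpr (fun b hb => (hAc b hb).symm)
    have hcntRc : R.count c = 0 := List.count_eq_zero.mpr hcR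
    have hrc : rest.count c = A.length := by
      rw [← hrest, List.count_append, hcntA, hcntRc]
      omega
    have hcount_c : (c :: rest).count c = 1 + A.length := by
      rw [List.count_cons_self, hrc]; omega
    -- distinct members
    have hofR : PySem.Set.ofList (c :: rest) = c :: PySem.Set.ofList R := by
      rw [PySem.Set.ofList_cons, discard_ofList_filter]
      congr 1
      rw [← hrest, List.filter_append]
      have h1 : A.filter (fun d => !(d == c)) = [] := by
        rw [List.filter_eq_nil_iff]
        intro a ha; simp [hAc a ha]
      have h2 : R.filter (fun d => !(d == c)) = R := by
        rw [List.filter_eq_self]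
        intro a ha
        have : a ≠ c := fun hh => hcR (hh ▸ ha)
        simp [this]
      rw [h1, h2, List.nil_append]
    rw [runLengths, hofR, List.map_cons, hcount_c]
    have hmapR : (PySem.Set.ofList R).map (fun d => ((c :: rest).count d : Int))
        = (PySem.Set.ofList R).map (fun d => (R.count d : Int)) := by
      refine List.map_congr_left (fun d hd => ?_)
      have hdR : d ∈ R := (PySem.Set.mem_ofList R d).mp hd
      have hdc : d ≠ c := fun hh => hcR (hh ▸ hdR)
      have hdA : d ∉ A := fun hh => hdc (hAc d hh)
      have h0 : A.count d = 0 := List.count_eq_zero.mpr hdA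
      have h1 : rest.count d = R.count d := by
        rw [← hrest, List.count_append, h0]; omega
      have : (c :: rest).count d = R.count d := by
        simp [Ne.symm hdc, h1]
      rw [this]
    rw [hmapR, ← ih hpwR]
    congr 1

-- topStep is right-commutative, so its fold is permutation-invariant
theorem topStep_rcomm : RightCommutative topStep := by
  constructor
  intro p a b
  simp only [topStep]
  split_ifs <;> simp_all <;> omega

theorem topFold_eq_sorted (vs : List Int) (hpos : ∀ v ∈ vs, 0 < v) :
    vs.foldl topStep (0, 0)
      = ((PySem.List.sorted vs (fun v => v) true).getD 0 0,
         (PySem.List.sorted vs (fun v => v) true).getD 1 0) := by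
  induction vs using List.reverseRecOn with
  | nil => simp [PySem.List.sorted]
  | append_singleton vs r ih =>
    have hposvs : ∀ v ∈ vs, 0 < v := fun v hv => hpos v (by simp [hv])
    have hr : 0 < r := hpos r (by simp)
    rw [List.foldl_append, List.foldl_cons, List.foldl_nil, ih hposvs]
    rw [PySem.List.sorted_rev_eq_foldl_insertBy (vs ++ [r]), List.foldl_append,
      List.foldl_cons, List.foldl_nil, ← PySem.List.sorted_rev_eq_foldl_insertBy vs]
    have hpw := PySem.List.sorted_pairwise_rev vs (fun v => v)
    have hmem : ∀ v ∈ PySem.List.sorted vs (fun v => v) true, 0 < v := by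
      intro v hv; exact hposvs v ((PySem.List.mem_sorted vs _ true v).mp hv)
    rcases hL : PySem.List.sorted vs (fun v => v) true with _ | ⟨x, _ | ⟨y, t⟩⟩
    · simp [PySem.List.insertBy, topStep, hr]
    · rw [hL] at hmem
      have hx : 0 < x := hmem x (by simp)
      simp only [PySem.List.insertBy, topStep]
      by_cases hxr : x < r
      · simp [hxr]
      · simp [hxr, hr]
    · rw [hL] at hpw hmem
      have hyx : y ≤ x := (List.pairwise_cons.mp hpw).1 y (by simp)
      simp only [PySem.List.insertBy, topStep]
      by_cases hxr : x < r
      · simp [hxr]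
      · by_cases hyr : y < r
        · simp [hxr, hyr]
        · simp [hxr, hyr]

-- Python's str.replace with a single-character pattern and replacement is a character map
theorem replace_go_singleton (a b : Char) : ∀ (fuel : Nat) (l : List Char) (acc : List Char),
    l.length ≤ fuel →
    PySem.Chars.replace.go [a] [b] fuel l acc
      = acc.reverse ++ l.map (fun c => if c = a then b else c) := by
  intro fuel
  induction fuel with
  | zero =>
    intro l acc h
    cases l with
    | nil => simp [PySem.Chars.replace.go]
    | cons c t => simp at h
  | succ n ih =>
    intro l acc h
    cases l with
    | nil => simp [PySem.Chars.replace.go]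
    | cons c t =>
      rw [PySem.Chars.replace.go]
      by_cases hac : a = c
      · subst hac
        have hp : ([a].isPrefixOf (a :: t)) = true := by simp [List.isPrefixOf]
        rw [hp]
        have hdrop : List.drop [a].length (a :: t) = t := by simp
        simp only [if_true, hdrop]
        rw [ih t ([b].reverse ++ acc) (by simp at h; omega)]
        simp
      · have hp : ([a].isPrefixOf (c :: t)) = false := by
          simp [List.isPrefixOf]; exact hac
        rw [hp]
        simp only [Bool.false_eq_true, if_false]
        rw [ih t (c :: acc) (by simp at h; omega)]
        have hca : c ≠ a := fun hh => hac hh.symm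
        simp [hca]

theorem replace_singleton (l : List Char) (a b : Char) :
    PySem.Chars.replace l [a] [b] = l.map (fun c => if c = a then b else c) := by
  rw [PySem.Chars.replace]
  simp only [List.isEmpty_cons, Bool.false_eq_true, if_false]
  rw [replace_go_singleton a b l.length l [] le_rfl]
  simp

theorem effHand_perm (hand : List Char) (part2 : Bool) :
    ∃ m : Char,
      (pyEffHand hand part2).Perm
        ((hand.filter (fun c => !(part2 && c == 'J')))
          ++ List.replicate (if part2 then hand.count 'J' else 0) m)
      ∧ ((if part2 then hand.count 'J' else 0) ≠ 0 →
          ∀ c ∈ hand.filter (fun c => !(part2 && c == 'J')),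
            (hand.filter (fun c => !(part2 && c == 'J'))).count c
              ≤ (hand.filter (fun c => !(part2 && c == 'J'))).count m) := by
  cases part2 with
  | false =>
    refine ⟨'J', ?_, ?_⟩
    · simp [pyEffHand]
    · simp
  | true =>
    have hcoreeq : hand.filter (fun c => !(true && c == 'J')) = hand.filter (fun c => c ≠ 'J') := by
      apply List.filter_congr
      intro c _
      rw [Bool.eq_iff_iff]
      simp
    by_cases h5 : hand = ['J', 'J', 'J', 'J', 'J']
    · refine ⟨'J', ?_, ?_⟩
      · subst h5
        simp [pyEffHand]
      · subst h5
        intro _ c hc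
        simp at hc
    · set mc : Char := ((PySem.List.max? (PySem.Dict.counter (hand.filter (fun c => c ≠ 'J'))).items (fun p => p.2)).getD ('?', 0)).1 with hmc
      refine ⟨mc, ?_, ?_⟩
      · have he : pyEffHand hand true = PySem.Chars.replace hand ['J'] [mc] := by
          rw [pyEffHand, if_pos ⟨rfl, h5⟩]
        rw [he, replace_singleton, hcoreeq]
        -- hand ~ (filter ≠J) ++ (filter =J); map the substitution over both parts
        have hpart := List.filter_append_perm (fun c => decide (c ≠ 'J')) hand
        refine ((hpart.map (fun c => if c = 'J' then mc else c)).symm).trans ?_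
        rw [List.map_append]
        have h1 : (hand.filter (fun c => decide (c ≠ 'J'))).map (fun c => if c = 'J' then mc else c)
            = hand.filter (fun c => decide (c ≠ 'J')) := by
          conv_rhs => rw [← List.map_id (hand.filter (fun c => decide (c ≠ 'J')))]
          refine List.map_congr_left (fun c hc => ?_)
          have : c ≠ 'J' := by simpa using (List.mem_filter.mp hc).2
          simp [this]
        have h2 : (hand.filter (fun c => !decide (c ≠ 'J'))).map (fun c => if c = 'J' then mc else c)
            = List.replicate (hand.count 'J') mc := by
          have : hand.filter (fun c => !decide (c ≠ 'J')) = hand.filter (fun c => c == 'J') := by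
            apply List.filter_congr; intro c _; rw [Bool.eq_iff_iff]; simp
          rw [this]
          have hf : hand.filter (fun c => c == 'J') = List.replicate (hand.count 'J') 'J' := by
            simpa using List.filter_eq (l := hand) 'J'
          rw [hf, List.map_replicate]
          simp
        rw [h1, h2]
        simp
      · intro _ c hc
        rw [hcoreeq] at hc ⊢
        set core := hand.filter (fun c => c ≠ 'J') with hcore
        have hcne : core ≠ [] := by
          intro hh
          rw [hh] at hc
          simp at hc
        have hitems : (PySem.Dict.counter core).items ≠ [] := by
          rw [PySem.Dict.items_counter]
          intro hh
          rw [List.map_eq_nil_iff] at hh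
          have : c ∈ PySem.Set.ofList core := (PySem.Set.mem_ofList core c).mpr hc
          rw [hh] at this
          simp at this
        rcases hmq : PySem.List.max? (PySem.Dict.counter core).items (fun p => p.2) with _ | p
        · rw [PySem.List.max?_eq_none_iff] at hmq
          exact absurd hmq hitems
        · have hmcp : mc = p.1 := by rw [hmc, hmq]; rfl
          have hpmem := PySem.List.max?_mem hmq
          rw [PySem.Dict.items_counter] at hpmem
          rcases List.mem_map.mp hpmem with ⟨k, hk, hkp⟩
          have hp2 : p.2 = (core.count k : Int) := by rw [← hkp]
          have hp1 : p.1 = k := by rw [← hkp]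
          have hcmem : (c, (core.count c : Int)) ∈ (PySem.Dict.counter core).items := by
            rw [PySem.Dict.items_counter]
            exact List.mem_map.mpr ⟨c, (PySem.Set.mem_ofList core c).mpr hc, rfl⟩
          have hle := PySem.List.max?_isMax hmq _ hcmem
          simp only at hle
          rw [hp2] at hle
          have : core.count c ≤ core.count k := by exact_mod_cast hle
          rw [hmcp, hp1]
          exact this

theorem countgo_singleton (a : Char) : ∀ (fuel : Nat) (l : List Char) (acc : Nat), l.length ≤ fuel →
    PySem.Chars.count.go [a] fuel l acc = acc + l.count a := by
  intro fuel
  induction fuel with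
  | zero =>
    intro l acc h
    cases l with
    | nil => simp [PySem.Chars.count.go]
    | cons c t => simp at h
  | succ n ih =>
    intro l acc h
    cases l with
    | nil => simp [PySem.Chars.count.go]
    | cons c t =>
      rw [PySem.Chars.count.go]
      by_cases hac : a = c
      · subst hac
        have hp : ([a].isPrefixOf (a :: t)) = true := by simp [List.isPrefixOf]
        rw [hp]
        have hdrop : List.drop [a].length (a::t) = t := by simp
        rw [hdrop]
        rw [ih t (acc+1) (by simp at h; omega)]
        simp
        omega
      · have hp : ([a].isPrefixOf (c :: t)) = false := by
          simp [List.isPrefixOf]; exact hac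
        rw [hp]
        simp only [Bool.false_eq_true, if_false]
        rw [ih t acc (by simp at h; omega)]
        have : c ≠ a := fun hh => hac hh.symm
        simp [this]

-- single-character str.count is the char count
theorem chars_count_singleton (l : List Char) (a : Char) :
    PySem.Chars.count l [a] = l.count a := by
  simp [PySem.Chars.count, countgo_singleton a l.length l 0 le_rfl]

-- A's cascade and Source B's closing formula agree on every (c0, c1)
theorem table_eq (x0 x1 : Int) :
    (if x0 = 5 then (1 : Int)
     else if x0 = 4 then 2
     else if x0 = 3 then (if x1 = 2 then 3 else 4)
     else if x0 = 2 then (if x1 = 2 then 5 else 6)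
     else 7) = pyFormulaB x0 x1 := by
  unfold pyFormulaB
  split_ifs <;> omega

-- the two score functions agree on every hand
theorem formulaB_mem (b s : Int) : pyFormulaB b s ∈ ([7, 6, 5, 4, 3, 2, 1] : List Int) := by
  unfold pyFormulaB
  split_ifs <;> simp <;> omega

theorem score_eq (hand : List Char) (part2 : Bool) :
    pyScoreA hand part2 = pyScoreB hand part2 := by
  obtain ⟨m, hperm, hmax⟩ := effHand_perm hand part2
  unfold pyScoreA pyScoreB
  simp only []
  set hand1 := pyEffHand hand part2 with hh1
  set core := hand.filter (fun c => !(part2 && c == 'J')) with hcore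
  set nJn : Nat := if part2 then hand.count 'J' else 0 with hnJn
  set mcl := PySem.List.sorted (PySem.Dict.counter hand1).items (fun p => p.2) true with hmcl
  -- A's two reads are the first two entries of descVals hand1
  have hc0 : (PySem.List.pyGetD mcl 0 ('?', 0)).2 = (descVals hand1).getD 0 0 := by
    rw [PySem.List.pyGetD_ofNat']
    unfold descVals
    rw [sorted_values_eq, ← hmcl, getD_map_snd mcl 0 '?']
  have hc1 : (PySem.List.pyGetD mcl 1 ('?', 0)).2 = (descVals hand1).getD 1 0 := by
    rw [PySem.List.pyGetD_ofNat']
    unfold descVals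
    rw [sorted_values_eq, ← hmcl, getD_map_snd mcl 1 '?']
  rw [hc0, hc1, table_eq]
  -- A's descVals: shift the head of descVals core by nJn
  have hA : descVals hand1 = match descVals core with
      | [] => if nJn = 0 then [] else [(nJn : Int)]
      | v :: t => (v + nJn) :: t := by
    rw [descVals_perm hperm, descVals_append_replicate core m nJn hmax]
  -- B's scan reads the first two entries of descVals core
  have hpos : ∀ v ∈ (PySem.Dict.counter core).values, 0 < v := by
    rw [values_counter]
    intro v hv
    rcases List.mem_map.mp hv with ⟨c, hc, hvc⟩
    have : c ∈ core := (PySem.Set.mem_ofList core c).mp hc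
    have := List.count_pos_iff.mpr this
    omega
  have hvperm : ((PySem.Set.ofList (PySem.List.sorted core (fun c => c) false)).map
      (fun c => ((PySem.List.sorted core (fun c => c) false).count c : Int))).Perm
      ((PySem.Dict.counter core).values) := by
    rw [values_counter core]
    have hsp : (PySem.List.sorted core (fun c => c) false).Perm core :=
      PySem.List.sorted_perm core (fun c => c) false
    rw [List.map_congr_left (l := PySem.Set.ofList (PySem.List.sorted core (fun c => c) false))
      (f := fun c => ((PySem.List.sorted core (fun c => c) false).count c : Int))
      (g := fun c => (core.count c : Int))
      (fun c _ => by
        show (((PySem.List.sorted core (fun c => c) false).count c : Nat) : Int) = _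
        rw [hsp.count_eq])]
    exact (ofList_perm_of_perm hsp).map _
  have hbs : runScanB (PySem.List.sorted core (fun c => c) false) 0 0
      = ((descVals core).getD 0 0, (descVals core).getD 1 0) := by
    rw [runScanB_eq_foldl, runLengths_grouped _ (PySem.List.sorted_pairwise core (fun c => c))]
    rw [List.Perm.foldl_eq (rcomm := topStep_rcomm) hvperm (0, 0)]
    exact topFold_eq_sorted _ hpos
  rw [hbs]
  -- the joker count
  have hnj : (if part2 then ((PySem.Chars.count hand ['J'] : Nat) : Int) else 0) = ((nJn : Nat) : Int) := by
    rw [hnJn]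
    cases part2 <;> simp [chars_count_singleton]
  rw [hnj]
  -- case on descVals core
  rcases hS : descVals core with _ | ⟨v, t⟩
  · rw [hS] at hA
    simp only at hA
    rcases Nat.eq_zero_or_pos nJn with hz | hp
    · rw [hA, if_pos hz, hz]
      simp
    · rw [hA, if_neg (by omega)]
      simp
  · rw [hS] at hA
    simp only at hA
    rw [hA]
    simp only [List.getD_cons_zero, List.getD_cons_succ]

def bef2 {α κ₂ : Type} [LT κ₂] [DecidableLT κ₂] (k1 : α → Int) (k2 : α → κ₂) : α → α → Bool :=
  fun a b => decide (k1 b < k1 a) || (!decide (k1 a < k1 b) && decide (k2 b < k2 a))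

theorem sorted2_eq_foldl {α κ₂ : Type} [LT κ₂] [DecidableLT κ₂]
    (xs : List α) (k1 : α → Int) (k2 : α → κ₂) :
    PySem.List.sorted2 xs k1 k2 true
      = xs.foldl (fun acc x => PySem.List.insertBy (bef2 k1 k2) x acc) [] := by
  simp [PySem.List.sorted2]
  rfl

theorem insertBy_flatMap {α κ₂ : Type} [LT κ₂] [DecidableLT κ₂]
    (k1 : α → Int) (k2 : α → κ₂) (x : α) :
    ∀ (vs : List Int) (S : Int → List α),
      vs.Pairwise (fun a b => b < a) →
      (∀ v ∈ vs, ∀ y ∈ S v, k1 y = v) →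
      k1 x ∈ vs →
      PySem.List.insertBy (bef2 k1 k2) x (vs.flatMap S)
        = vs.flatMap (fun v => if v = k1 x
            then PySem.List.insertBy (fun a b => decide (k2 b < k2 a)) x (S v) else S v) := by
  intro vs
  induction vs with
  | nil => intro S _ _ hx; simp at hx
  | cons v vt ih =>
    intro S hpw hS hx
    have hpw' := List.pairwise_cons.mp hpw
    by_cases hv : v = k1 x
    · -- insertion lands in this first segment
      rw [List.flatMap_cons, List.flatMap_cons, if_pos hv]
      have hrest : ∀ y ∈ vt.flatMap S, bef2 k1 k2 x y = true := by
        intro y hy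
        rcases List.mem_flatMap.mp hy with ⟨w, hw, hyw⟩
        have hkyw : k1 y = w := hS w (by simp [hw]) y hyw
        have hwlt : w < v := hpw'.1 w hw
        have : k1 y < k1 x := by rw [hkyw, ← hv] at *; omega
        simp [bef2, this]
      rw [insertBy_append_right _ _ _ _ hrest]
      have hseg : ∀ y ∈ S v, bef2 k1 k2 x y = (fun a b => decide (k2 b < k2 a)) x y := by
        intro y hy
        have hky : k1 y = v := hS v (by simp) y hy
        have h1 : ¬ (k1 y < k1 x) := by omega
        have h2 : ¬ (k1 x < k1 y) := by omega
        simp [bef2, h1, h2]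
      rw [insertBy_congr (bef2 k1 k2) (fun a b => decide (k2 b < k2 a)) x (S v) hseg]
      have hvt : vt.flatMap (fun w => if w = k1 x
          then PySem.List.insertBy (fun a b => decide (k2 b < k2 a)) x (S w) else S w)
          = vt.flatMap S := by
        refine List.flatMap_congr (fun w hw => ?_)
        have hwlt : w < v := hpw'.1 w hw
        have : w ≠ k1 x := by omega
        rw [if_neg this]
      rw [hvt]
    · -- skip this segment
      rw [List.flatMap_cons, List.flatMap_cons, if_neg hv]
      have hxvt : k1 x ∈ vt := by
        rcases List.mem_cons.mp hx with h1 | h1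
        · exact absurd h1.symm hv
        · exact h1
      have hseg : ∀ y ∈ S v, bef2 k1 k2 x y = false := by
        intro y hy
        have hky : k1 y = v := hS v (by simp) y hy
        have hgt : k1 x < v := hpw'.1 _ hxvt
        have h1 : ¬ (k1 y < k1 x) := by omega
        have h2 : k1 x < k1 y := by omega
        simp [bef2, h1, h2]
      rw [insertBy_append_left _ _ _ _ hseg]
      rw [ih S hpw'.2 (fun w hw y hy => hS w (by simp [hw]) y hy) hxvt]

theorem sorted2_buckets {α κ₂ : Type} [LT κ₂] [DecidableLT κ₂]
    (k1 : α → Int) (k2 : α → κ₂) (vs : List Int)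
    (hdec : vs.Pairwise (fun a b => b < a)) :
    ∀ (xs : List α), (∀ x ∈ xs, k1 x ∈ vs) →
    PySem.List.sorted2 xs k1 k2 true
      = vs.flatMap (fun v => PySem.List.sorted (xs.filter (fun x => k1 x == v)) k2 true) := by
  intro xs
  induction xs using List.reverseRecOn with
  | nil =>
    intro _
    rw [sorted2_eq_foldl]
    simp [PySem.List.sorted_eq_nil_iff]
  | append_singleton xs x ih =>
    intro hmem
    have hmem' : ∀ y ∈ xs, k1 y ∈ vs := fun y hy => hmem y (by simp [hy])
    have hx : k1 x ∈ vs := hmem x (by simp)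
    rw [sorted2_eq_foldl, List.foldl_append, List.foldl_cons, List.foldl_nil,
      ← sorted2_eq_foldl, ih hmem']
    rw [insertBy_flatMap k1 k2 x vs
      (fun v => PySem.List.sorted (xs.filter (fun y => k1 y == v)) k2 true) hdec
      (fun v _ y hy => by
        have : y ∈ xs.filter (fun y => k1 y == v) := (PySem.List.mem_sorted _ _ _ _).mp hy
        have := (List.mem_filter.mp this).2
        simpa using this) hx]
    refine List.flatMap_congr (fun v hv => ?_)
    by_cases hvx : v = k1 x
    · rw [if_pos hvx]
      have hfx : (xs ++ [x]).filter (fun y => k1 y == v) = xs.filter (fun y => k1 y == v) ++ [x] := by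
        rw [List.filter_append]
        simp [hvx]
      rw [hfx]
      rw [show PySem.List.sorted (List.filter (fun y => k1 y == v) xs ++ [x]) k2 true
          = PySem.List.insertBy (fun a b => decide (k2 b < k2 a)) x
            (PySem.List.sorted (List.filter (fun y => k1 y == v) xs) k2 true) from by
        rw [PySem.List.sorted_rev_eq_foldl_insertBy, List.foldl_append, List.foldl_cons,
          List.foldl_nil, ← PySem.List.sorted_rev_eq_foldl_insertBy]]
    · rw [if_neg hvx]
      have hfx : (xs ++ [x]).filter (fun y => k1 y == v) = xs.filter (fun y => k1 y == v) := by
        rw [List.filter_append]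
        have : (k1 x == v) = false := by simp; omega
        simp [this]
      rw [hfx]

-- every score B produces lies in 7..1
theorem scoreB_mem (hand : List Char) (part2 : Bool) :
    pyScoreB hand part2 ∈ ([7, 6, 5, 4, 3, 2, 1] : List Int) := by
  exact formulaB_mem _ _

-- the bucket dict built by B's first loop holds exactly the hands of each score, in order
theorem buckets_getD (hands : List (String × Int)) (part2 : Bool) (s : Int) :
    (hands.foldl (fun d h => d.modify (pyScoreB h.1.toList part2) [] (fun l => l ++ [h]))
        (PySem.Dict.empty : PySem.Dict Int (List (String × Int)))).getD s []
      = hands.filter (fun h => pyScoreB h.1.toList part2 == s) := by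
  have h1 : hands.foldl (fun d h => d.modify (pyScoreB h.1.toList part2) [] (fun l => l ++ [h]))
      (PySem.Dict.empty : PySem.Dict Int (List (String × Int)))
      = (hands.map (fun h => (pyScoreB h.1.toList part2, h))).foldl
          (fun d p => d.modify p.1 [] (fun l => l ++ [p.2])) PySem.Dict.empty := by
    rw [List.foldl_map]
  rw [h1, PySem.Dict.getD_foldl_modify_append, PySem.Dict.getD_empty, List.nil_append,
    List.filter_map, List.map_map]
  have h2 : ((fun (p : Int × (String × Int)) => p.2) ∘ (fun h => (pyScoreB h.1.toList part2, h)))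
      = id := rfl
  rw [h2, List.map_id]
  rfl

-- ===== VERDICT (by name: the statement is the Claim_ definition above) =====
theorem sort_hands_spec : Claim_equal_sort_hands := by
  intro hands rank part2 _ _
  unfold Spec_sort_hands sort_hands sort_hands_alt
  simp only [score_eq]
  rw [sorted2_buckets (fun h => pyScoreB h.1.toList part2)
    (fun h => h.1.toList.map (fun c => (PySem.List.index? rank.toList c).getD 0))
    ([7, 6, 5, 4, 3, 2, 1] : List Int) (by decide) hands (fun x _ => scoreB_mem x.1.toList part2)]
  have hr : (PySem.List.pyRange 7 0 (-1)) = ([7, 6, 5, 4, 3, 2, 1] : List Int) := by decide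
  rw [hr, PySem.List.foldl_append_eq_flatMap, List.nil_append]
  refine (List.flatMap_congr (fun v _ => ?_)).symm
  rw [buckets_getD]
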